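-- pv_equiv track=rewrite | github.com/hswek/algorithm | 프로그래머스/2/17686. ［3차］ 파일명 정렬/［3차］ 파일명 정렬.py | solution
-- ===== SOURCE A (Python) =====
-- def solution(files):
--     answer = []
--     arr=[]
--     idx=0
--     for file in files:
--         head=''
--         number=''
--         tail=''
--         number_start=True
--         for i in range(len(file)):
--             if file[i].isdigit()==False and i!=0 and file[i-1].isdigit()==True:
--                 number_start=False
--                 tail+=file[i]
--             elif number_start==False:
--                 tail+=file[i]
--             elif file[i].isdigit()==False and number_start==True:
--                 head+=file[i]
--             elif file[i].isdigit()==True and number_start==True: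
--                 number+=file[i]
--         s=[head,number,tail,idx]
--         arr.append(s)
--         idx+=1
--     arr.sort(key=lambda x:[x[0].upper(),int(x[1]),x[3]])
--     for s in arr:
--         answer.append(s[0]+s[1]+s[2])
--
--     return answer
-- ===== SOURCE B (Python) =====
-- def solution(files):
--     # Bucket view: sort only the DISTINCT (HEAD.upper(), number) keys, then emit,
--     # for each key in order, the files carrying that key in input order.
--     def key(f):
--         i = 0
--         while i < len(f) and not f[i].isdigit():
--             i += 1
--         j = i
--         while j < len(f) and f[j].isdigit():
--             j += 1
--         return (f[:i].upper(), int(f[i:j]))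
--     ks = sorted(set(key(f) for f in files))
--     return [f for k in ks for f in files if key(f) == k]
-- ===== Notes on version B (the rewrite author's own statement) =====
-- stated objective: alternative
-- what changed: B never sorts the file list at all: it collects the distinct (HEAD.upper(), number) keys, sorts only those, and then emits for each key the files carrying it in input order (bucket/group-by emission), whereas A stable-sorts parsed (head,number,tail,index) quadruples and reconstructs the strings.
import Mathlib
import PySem

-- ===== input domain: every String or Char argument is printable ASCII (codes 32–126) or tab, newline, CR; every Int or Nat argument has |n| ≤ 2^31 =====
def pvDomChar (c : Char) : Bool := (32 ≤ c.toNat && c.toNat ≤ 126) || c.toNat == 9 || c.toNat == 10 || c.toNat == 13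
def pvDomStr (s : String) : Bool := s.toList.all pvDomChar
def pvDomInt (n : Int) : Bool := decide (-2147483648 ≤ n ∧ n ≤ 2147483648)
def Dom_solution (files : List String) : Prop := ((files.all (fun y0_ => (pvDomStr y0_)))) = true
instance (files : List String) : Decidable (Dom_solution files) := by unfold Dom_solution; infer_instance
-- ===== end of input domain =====

-- B never sorts the file list: it sorts only the DISTINCT (HEAD.upper(), number)
-- keys and then emits, for each key in order, the files carrying it in input order
-- (bucket emission); A stable-sorts parsed quadruples with an index tie-break.

-- ===== PORT A =====

-- one step of A's inner 'for i in range(len(file))' loop; state = (head, number, tail, number_start)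
def pvStepA (l : List Char) (q : List Char × List Char × List Char × Bool) (i : Nat) :
    List Char × List Char × List Char × Bool :=
  let c := l.getD i ' '          -- file[i]; i < len l always holds in the loop, so getD is exact
  let prev := l.getD (i - 1) ' ' -- file[i-1]; only read under the guard i ≠ 0, where it is in range
  match q with
  | (head, number, tail, ns) =>
    if (!PySem.Chars.isdigit c) && (decide (i ≠ 0)) && PySem.Chars.isdigit prev then
      (head, number, tail ++ [c], false)
    else if ns = false then
      (head, number, tail ++ [c], ns)
    else if !PySem.Chars.isdigit c then
      (head ++ [c], number, tail, ns)
    else if PySem.Chars.isdigit c then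
      (head, number ++ [c], tail, ns)
    else q

def pvParseA (l : List Char) : List Char × List Char × List Char × Bool :=
  (List.range l.length).foldl (pvStepA l) ([], [], [], true)

-- A's sort key lambda x: [x[0].upper(), int(x[1]), x[3]] — int('') is a ValueError
-- (excluded by Pre_solution); the .getD 0 there is never reached under Pre_.
def pvKeyA (s : List Char × List Char × List Char × Int) : List Char × Int × Int :=
  (PySem.Chars.upper s.1, (PySem.Int.ofChars? s.2.1).getD 0, s.2.2.2)

-- Python's comparison of the 3-element key lists, as a strict lexicographic test
def pvBefore3 (a b : List Char × List Char × List Char × Int) : Bool :=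
  decide ((pvKeyA a).1 < (pvKeyA b).1) ||
    (!decide ((pvKeyA b).1 < (pvKeyA a).1) &&
      (decide ((pvKeyA a).2.1 < (pvKeyA b).2.1) ||
        (!decide ((pvKeyA b).2.1 < (pvKeyA a).2.1) && decide ((pvKeyA a).2.2 < (pvKeyA b).2.2))))

def solution (files : List String) : List String :=
  let arr := (files.foldl
    (fun (st : List (List Char × List Char × List Char × Int) × Int) file =>
      let p := pvParseA file.toList
      (st.1 ++ [(p.1, p.2.1, p.2.2.1, st.2)], st.2 + 1)) ([], 0)).1
  -- arr.sort(key=…): Python's stable sort, modelled (as in PySem.List.sorted) as stable insertion sort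
  let sortedArr := arr.foldl (fun acc x => PySem.List.insertBy pvBefore3 x acc) []
  sortedArr.map (fun s => String.ofList (s.1 ++ s.2.1 ++ s.2.2.1))

-- ===== PORT B =====

-- B's first while loop: i stops at the first digit; returns (f[:i], f[i:])
def pvHeadSplit : List Char → List Char × List Char
  | [] => ([], [])
  | c :: r =>
    if PySem.Chars.isdigit c then ([], c :: r)
    else
      let p := pvHeadSplit r
      (c :: p.1, p.2)

-- B's second while loop: j stops at the first non-digit; returns f[i:j]
def pvNum : List Char → List Char
  | [] => []
  | c :: r => if PySem.Chars.isdigit c then c :: pvNum r else []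

-- B's key(f) = (f[:i].upper(), int(f[i:j])); int('') raises (outside Pre_), .getD 0 unreached there
def pvKeyB (f : String) : List Char × Int :=
  let p := pvHeadSplit f.toList
  (PySem.Chars.upper p.1, (PySem.Int.ofChars? (pvNum p.2)).getD 0)

def solution_alt (files : List String) : List String :=
  -- ks = sorted(set(key(f) for f in files)); then one filter pass per key
  let ks := PySem.List.sorted2 (PySem.Set.ofList (files.map pvKeyB))
              (fun k => k.1) (fun k => k.2) false
  ks.flatMap (fun k => files.filter (fun f => pvKeyB f == k))

-- ===== PRECONDITION & SPEC =====
-- Pre_ excludes filenames containing no digit: there Python A raises ValueError (int('')), and B raises too.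
def Pre_solution (files : List String) : Prop :=
  ∀ f ∈ files, f.toList.any PySem.Chars.isdigit = true
instance (files : List String) : Decidable (Pre_solution files) := by unfold Pre_solution; infer_instance

def pvWitness_solution : List String := ["b2", "a1"]

def Spec_solution (files : List String) (out : List String) : Prop := out = solution_alt files
instance (files : List String) (out : List String) : Decidable (Spec_solution files out) := by unfold Spec_solution; infer_instance

-- ===== CLAIM (what is proved, stated in full; the proofs are below) =====
def Claim_equal_solution : Prop := ∀ (files : List String), Dom_solution files → Pre_solution files → Spec_solution files (solution files)

-- ===== LEMMAS AND PROOFS =====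

-- proof-side machine: A's loop body as a char-at-a-time automaton, with the
-- "previous char was a digit" flag carried in the state instead of re-read via l[i-1]
def pvStep1 (q : Bool × List Char × List Char × List Char × Bool) (c : Char) :
    Bool × List Char × List Char × List Char × Bool :=
  match q with
  | (pd, head, number, tail, ns) =>
    (PySem.Chars.isdigit c,
      if (!PySem.Chars.isdigit c) && pd then (head, number, tail ++ [c], false)
      else if ns = false then (head, number, tail ++ [c], ns)
      else if !PySem.Chars.isdigit c then (head ++ [c], number, tail, ns)
      else if PySem.Chars.isdigit c then (head, number ++ [c], tail, ns)
      else (head, number, tail, ns))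

def pvNd (c : Char) : Bool := !PySem.Chars.isdigit c

lemma pvBridge (l : List Char) : ∀ i : Nat, i ≤ l.length →
    (List.range i).foldl (pvStepA l) ([], [], [], true)
      = ((l.take i).foldl pvStep1 (false, [], [], [], true)).2
    ∧ ((l.take i).foldl pvStep1 (false, [], [], [], true)).1
      = ((decide (i ≠ 0)) && PySem.Chars.isdigit (l.getD (i - 1) ' ')) := by
  intro i
  induction i with
  | zero => intro _; simp
  | succ i ih =>
    intro hle
    have hi : i < l.length := by omega
    obtain ⟨h1, h2⟩ := ih (by omega)
    have htake : l.take (i + 1) = l.take i ++ [l[i]] := by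
      rw [List.take_add_one]; simp [List.getElem?_eq_getElem hi]
    have hrange : List.range (i + 1) = List.range i ++ [i] := List.range_succ
    have hget : l.getD i ' ' = l[i] := by
      simp [List.getD_eq_getElem?_getD, List.getElem?_eq_getElem hi]
    constructor
    · rw [hrange, htake, List.foldl_append, List.foldl_append, h1]
      rcases hst : ((l.take i).foldl pvStep1 (false, [], [], [], true)) with ⟨pd, head, number, tail, ns⟩
      simp only [List.foldl_cons, List.foldl_nil]
      rw [hst] at h2
      simp only at h2
      simp [pvStepA, pvStep1, h2, List.getElem?_eq_getElem hi, and_assoc]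
    · rw [htake, List.foldl_append]
      rcases hst : ((l.take i).foldl pvStep1 (false, [], [], [], true)) with ⟨pd, head, number, tail, ns⟩
      simp [pvStep1, List.getD_eq_getElem?_getD, List.getElem?_eq_getElem hi]

-- phase 3: number_start is false, every remaining char goes to tail
lemma pvPhase3 (l : List Char) : ∀ (pd : Bool) (h n t : List Char),
    (l.foldl pvStep1 (pd, h, n, t, false)).2 = (h, n, t ++ l, false) := by
  induction l with
  | nil => intro pd h n t; simp
  | cons c r ih =>
    intro pd h n t
    simp only [List.foldl_cons, pvStep1]
    by_cases hd : PySem.Chars.isdigit c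
    · simp [hd, ih]
    · simp only [hd]
      cases pd <;> simp [ih]

-- phase 2: inside the digit run (previous char was a digit, number_start still true)
lemma pvPhase2 (l : List Char) : ∀ (h n t : List Char),
    (l.foldl pvStep1 (true, h, n, t, true)).2
      = (h, n ++ l.takeWhile PySem.Chars.isdigit, t ++ l.dropWhile PySem.Chars.isdigit,
          (l.dropWhile PySem.Chars.isdigit).isEmpty) := by
  induction l with
  | nil => intro h n t; simp
  | cons c r ih =>
    intro h n t
    simp only [List.foldl_cons, pvStep1]
    by_cases hd : PySem.Chars.isdigit c
    · simp [hd, ih]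
    · simp [hd, pvPhase3]

-- phase 1: before the first digit (previous char not a digit, number_start true)
lemma pvPhase1 (l : List Char) : ∀ (h : List Char),
    (l.foldl pvStep1 (false, h, [], [], true)).2
      = (h ++ l.takeWhile pvNd,
          (l.dropWhile pvNd).takeWhile PySem.Chars.isdigit,
          (l.dropWhile pvNd).dropWhile PySem.Chars.isdigit,
          ((l.dropWhile pvNd).dropWhile PySem.Chars.isdigit).isEmpty) := by
  induction l with
  | nil => intro h; simp
  | cons c r ih =>
    intro h
    simp only [List.foldl_cons, pvStep1]
    by_cases hd : PySem.Chars.isdigit c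
    · simp [hd, pvNd, pvPhase2]
    · simp [hd, pvNd, ih]

-- A's inner loop computes the (\D*, \d*, rest) span of the filename
lemma pvParseA_eq (l : List Char) :
    pvParseA l
      = (l.takeWhile pvNd,
          (l.dropWhile pvNd).takeWhile PySem.Chars.isdigit,
          (l.dropWhile pvNd).dropWhile PySem.Chars.isdigit,
          ((l.dropWhile pvNd).dropWhile PySem.Chars.isdigit).isEmpty) := by
  have := (pvBridge l l.length le_rfl).1
  rw [pvParseA, this, List.take_length, pvPhase1 l []]
  simp

-- B's two while loops compute the same span
lemma pvHeadSplit_eq (l : List Char) :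
    pvHeadSplit l = (l.takeWhile pvNd, l.dropWhile pvNd) := by
  induction l with
  | nil => simp [pvHeadSplit]
  | cons c r ih =>
    by_cases hd : PySem.Chars.isdigit c <;>
      simp [pvHeadSplit, hd, pvNd, ih]

lemma pvNum_eq (l : List Char) : pvNum l = l.takeWhile PySem.Chars.isdigit := by
  induction l with
  | nil => simp [pvNum]
  | cons c r ih =>
    by_cases hd : PySem.Chars.isdigit c <;> simp [pvNum, hd, ih]

-- the strict "tuple <" test sorted2 uses on (HEAD, number) keys
def pvLtK (a b : List Char × Int) : Bool :=
  decide (a.1 < b.1) || (!decide (b.1 < a.1) && decide (a.2 < b.2))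

-- B's key comparison lifted to filenames (= A's key comparison once the index tie is dropped)
def pvBefore2 (a b : String) : Bool := pvLtK (pvKeyB a) (pvKeyB b)

-- the quad A stores for file f at original position j
def pvQuadOf (f : String) (j : Int) : List Char × List Char × List Char × Int :=
  ((pvParseA f.toList).1, (pvParseA f.toList).2.1, (pvParseA f.toList).2.2.1, j)

lemma pvKey1_quad (f : String) (j : Int) :
    (pvKeyA (pvQuadOf f j)).1 = (pvKeyB f).1 := by
  simp [pvKeyA, pvKeyB, pvQuadOf, pvParseA_eq, pvHeadSplit_eq]

lemma pvKey2_quad (f : String) (j : Int) :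
    (pvKeyA (pvQuadOf f j)).2.1 = (pvKeyB f).2 := by
  simp [pvKeyA, pvKeyB, pvQuadOf, pvParseA_eq, pvHeadSplit_eq, pvNum_eq]

lemma pvKey3_quad (f : String) (j : Int) : (pvKeyA (pvQuadOf f j)).2.2 = j := rfl

-- reconstruction: head + number + tail is the original filename
lemma pvConc_quad (f : String) (j : Int) :
    String.ofList ((pvQuadOf f j).1 ++ (pvQuadOf f j).2.1 ++ (pvQuadOf f j).2.2.1) = f := by
  simp only [pvQuadOf, pvParseA_eq]
  rw [List.append_assoc, List.takeWhile_append_dropWhile, List.takeWhile_append_dropWhile]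
  exact String.ofList_toList

-- A's first loop builds the list of quads in enumerate order
lemma pvArr_eq (files : List String) : ∀ (acc : List (List Char × List Char × List Char × Int)) (i : Int),
    (files.foldl
      (fun (st : List (List Char × List Char × List Char × Int) × Int) file =>
        let p := pvParseA file.toList
        (st.1 ++ [(p.1, p.2.1, p.2.2.1, st.2)], st.2 + 1)) (acc, i)).1
      = acc ++ (PySem.List.enumerate files i).map (fun p => pvQuadOf p.2 p.1) := by
  induction files with
  | nil => intro acc i; simp
  | cons f r ih =>
    intro acc i
    simp only [List.foldl_cons, PySem.List.enumerate_cons, List.map_cons]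
    rw [ih]
    simp [pvQuadOf]

-- one unfolding step of PySem.List.insertBy (definitional)
lemma pvInsertBy_cons {α : Type} (b : α → α → Bool) (x y : α) (ys : List α) :
    PySem.List.insertBy b x (y :: ys)
      = if b x y then x :: y :: ys else y :: PySem.List.insertBy b x ys := rfl

-- inserting a quad whose index exceeds every index already present is the same as
-- B's key-only insertion of the bare filename (the index tie-break never fires)
lemma pvInsert_comm (f : String) (j : Int) :
    ∀ (acc : List (List Char × List Char × List Char × Int)),
    (∀ q ∈ acc, (∃ g j', q = pvQuadOf g j') ∧ q.2.2.2 < j) →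
    (PySem.List.insertBy pvBefore3 (pvQuadOf f j) acc).map
        (fun s => String.ofList (s.1 ++ s.2.1 ++ s.2.2.1))
      = PySem.List.insertBy pvBefore2 f
          (acc.map (fun s => String.ofList (s.1 ++ s.2.1 ++ s.2.2.1))) := by
  intro acc
  induction acc with
  | nil =>
    intro _
    have e1 : PySem.List.insertBy pvBefore3 (pvQuadOf f j) [] = [pvQuadOf f j] := rfl
    have e2 : PySem.List.insertBy pvBefore2 f [] = [f] := rfl
    simp only [e1, e2, List.map_cons, List.map_nil, pvConc_quad]
  | cons y rest ih =>
    intro hinv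
    obtain ⟨⟨g, j', hy⟩, hlt⟩ := hinv y (List.mem_cons_self ..)
    subst hy
    have hj : j' < j := by simpa [pvQuadOf] using hlt
    have hb : pvBefore3 (pvQuadOf f j) (pvQuadOf g j')
        = pvBefore2 f (String.ofList ((pvQuadOf g j').1 ++ (pvQuadOf g j').2.1 ++ (pvQuadOf g j').2.2.1)) := by
      have h3 : (pvKeyA (pvQuadOf f j)).2.2 < (pvKeyA (pvQuadOf g j')).2.2 ↔ False := by
        simp only [pvKey3_quad, iff_false, not_lt]; omega
      simp only [pvBefore3, pvBefore2, pvLtK, pvConc_quad, pvKey1_quad, pvKey2_quad, h3]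
      simp
    simp only [List.map_cons, pvInsertBy_cons, hb, pvConc_quad]
    split_ifs with hbf
    · simp only [List.map_cons, pvConc_quad]
    · simp only [List.map_cons, pvConc_quad]
      rw [ih (fun q hq => hinv q (List.mem_cons_of_mem _ hq))]

-- the whole sorting loop commutes with dropping the index column
lemma pvSort_comm : ∀ (fs : List String) (i : Int)
    (acc : List (List Char × List Char × List Char × Int)),
    (∀ q ∈ acc, (∃ g j', q = pvQuadOf g j') ∧ q.2.2.2 < i) →
    (((PySem.List.enumerate fs i).map (fun p => pvQuadOf p.2 p.1)).foldl
        (fun a x => PySem.List.insertBy pvBefore3 x a) acc).map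
        (fun s => String.ofList (s.1 ++ s.2.1 ++ s.2.2.1))
      = fs.foldl (fun a x => PySem.List.insertBy pvBefore2 x a)
          (acc.map (fun s => String.ofList (s.1 ++ s.2.1 ++ s.2.2.1))) := by
  intro fs
  induction fs with
  | nil => intro i acc _; simp
  | cons f r ih =>
    intro i acc hinv
    simp only [PySem.List.enumerate_cons, List.map_cons, List.foldl_cons]
    rw [← pvInsert_comm f i acc hinv]
    apply ih (i + 1)
    intro q hq
    rw [PySem.List.mem_insertBy] at hq
    rcases hq with hq | hq
    · subst hq; exact ⟨⟨f, i, rfl⟩, by simp [pvQuadOf]⟩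
    · obtain ⟨hg, hlt⟩ := hinv q hq
      exact ⟨hg, by omega⟩

-- ===== order facts about pvLtK (strict lexicographic order on the key pairs) =====

lemma pvLtK_iff (a b : List Char × Int) :
    pvLtK a b = true ↔ (a.1 < b.1 ∨ (¬ b.1 < a.1 ∧ a.2 < b.2)) := by
  simp [pvLtK]

lemma pvLtK_irrefl (a : List Char × Int) : pvLtK a a = false := by
  simp [pvLtK]

lemma pvLtK_ne {a b : List Char × Int} (h : pvLtK a b = true) : a ≠ b := by
  intro hab
  rw [hab, pvLtK_irrefl] at h
  cases h

lemma pvLtK_asymm {a b : List Char × Int} (h : pvLtK a b = true) : pvLtK b a = false := by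
  by_contra hc
  rw [Bool.not_eq_false, pvLtK_iff] at hc
  rw [pvLtK_iff] at h
  rcases h with h | ⟨h1, h2⟩ <;> rcases hc with hc | ⟨hc1, hc2⟩
  · exact absurd h (not_lt_of_gt hc)
  · exact hc1 h
  · exact h1 hc
  · exact absurd h2 (not_lt_of_gt hc2)

lemma pvLtK_total {a b : List Char × Int} (hne : a ≠ b) :
    pvLtK a b = true ∨ pvLtK b a = true := by
  rw [pvLtK_iff, pvLtK_iff]
  rcases lt_trichotomy a.1 b.1 with h | h | h
  · exact Or.inl (Or.inl h)
  · rcases lt_trichotomy a.2 b.2 with h2 | h2 | h2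
    · exact Or.inl (Or.inr ⟨by rw [h]; exact lt_irrefl _, h2⟩)
    · exact absurd (Prod.ext h h2) hne
    · exact Or.inr (Or.inr ⟨by rw [h]; exact lt_irrefl _, h2⟩)
  · exact Or.inr (Or.inl h)

lemma pvLtK_trans {a b c : List Char × Int}
    (h1 : pvLtK a b = true) (h2 : pvLtK b c = true) : pvLtK a c = true := by
  rw [pvLtK_iff] at h1 h2 ⊢
  rcases h1 with h1 | ⟨h1a, h1b⟩ <;> rcases h2 with h2 | ⟨h2a, h2b⟩
  · exact Or.inl (lt_trans h1 h2)
  · exact Or.inl (lt_of_lt_of_le h1 (le_of_not_gt h2a))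
  · exact Or.inl (lt_of_le_of_lt (le_of_not_gt h1a) h2)
  · exact Or.inr ⟨fun h => h1a (lt_of_le_of_lt (le_of_not_gt h2a) h), lt_trans h1b h2b⟩

-- ===== insertBy placement lemmas =====

lemma pvInsertBy_nil {α : Type} (b : α → α → Bool) (x : α) :
    PySem.List.insertBy b x [] = [x] := rfl

lemma pvInsertBy_all_before {α : Type} (b : α → α → Bool) (x : α) (zs : List α)
    (h : ∀ y ∈ zs, b x y = true) : PySem.List.insertBy b x zs = x :: zs := by
  cases zs with
  | nil => rfl
  | cons y ys => rw [pvInsertBy_cons, if_pos (h y (List.mem_cons_self ..))]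

lemma pvInsertBy_skip {α : Type} (b : α → α → Bool) (x : α) (ys zs : List α)
    (h : ∀ y ∈ ys, b x y = false) :
    PySem.List.insertBy b x (ys ++ zs) = ys ++ PySem.List.insertBy b x zs := by
  induction ys with
  | nil => rfl
  | cons y ys ih =>
    rw [List.cons_append, pvInsertBy_cons, h y (List.mem_cons_self ..),
      if_neg Bool.false_ne_true, ih (fun y hy => h y (List.mem_cons_of_mem _ hy)),
      List.cons_append]

-- ===== the key list B sorts: strictly increasing, same members =====

-- pvSortK is what sorted2(ofList ks, fst, snd) unfolds to
def pvSortK (s : List (List Char × Int)) : List (List Char × Int) :=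
  s.foldl (fun acc x => PySem.List.insertBy pvLtK x acc) []

lemma pvMem_sortK_aux (s : List (List Char × Int)) :
    ∀ (acc : List (List Char × Int)) (y : List Char × Int),
    y ∈ s.foldl (fun acc x => PySem.List.insertBy pvLtK x acc) acc ↔ y ∈ acc ∨ y ∈ s := by
  induction s with
  | nil => intro acc y; simp
  | cons x r ih =>
    intro acc y
    rw [List.foldl_cons, ih, PySem.List.mem_insertBy, List.mem_cons]
    tauto

lemma pvMem_sortK (s : List (List Char × Int)) (y : List Char × Int) :
    y ∈ pvSortK s ↔ y ∈ s := by
  rw [pvSortK, pvMem_sortK_aux]; simp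

lemma pvPairwise_insertBy (x : List Char × Int) (l : List (List Char × Int))
    (hp : l.Pairwise (fun a b => pvLtK a b = true)) (hne : ∀ y ∈ l, x ≠ y) :
    (PySem.List.insertBy pvLtK x l).Pairwise (fun a b => pvLtK a b = true) := by
  induction l with
  | nil => rw [pvInsertBy_nil]; simp
  | cons y ys ih =>
    rw [pvInsertBy_cons]
    rcases List.pairwise_cons.mp hp with ⟨hy, hys⟩
    by_cases hxy : pvLtK x y = true
    · rw [if_pos hxy]
      refine List.pairwise_cons.mpr ⟨?_, hp⟩
      intro z hz
      rcases List.mem_cons.mp hz with rfl | hz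
      · exact hxy
      · exact pvLtK_trans hxy (hy z hz)
    · rw [if_neg hxy]
      refine List.pairwise_cons.mpr ⟨?_, ih hys (fun z hz => hne z (List.mem_cons_of_mem _ hz))⟩
      intro z hz
      rcases (PySem.List.mem_insertBy pvLtK x z ys).mp hz with rfl | hz
      · rcases pvLtK_total (hne y (List.mem_cons_self ..)).symm with h | h
        · exact h
        · exact absurd h hxy
      · exact hy z hz

lemma pvPairwise_sortK (s : List (List Char × Int)) (hnd : s.Nodup) :
    (pvSortK s).Pairwise (fun a b => pvLtK a b = true) := by
  induction s using List.reverseRecOn with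
  | nil => exact List.Pairwise.nil
  | append_singleton s x ih =>
    rw [pvSortK, List.foldl_append, List.foldl_cons, List.foldl_nil]
    rcases List.nodup_append.mp hnd with ⟨hs, -, hdisj⟩
    refine pvPairwise_insertBy x _ (ih hs) ?_
    intro y hy
    have hy' : y ∈ pvSortK s := hy
    rw [pvMem_sortK] at hy'
    intro h
    exact hdisj y hy' x (List.mem_cons_self ..) h.symm

-- ===== inserting one file into the grouped (bucketed) form =====

-- new key: f opens a bucket of its own at the key's sorted position
lemma pvInsert_group_new (f : String) :
    ∀ (ks : List (List Char × Int)) (g g' : (List Char × Int) → List String),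
    ks.Pairwise (fun a b => pvLtK a b = true) →
    (∀ k ∈ ks, ∀ y ∈ g k, pvKeyB y = k) →
    pvKeyB f ∉ ks →
    (∀ k ∈ ks, g' k = g k) →
    g' (pvKeyB f) = [f] →
    PySem.List.insertBy pvBefore2 f (ks.flatMap g)
      = (PySem.List.insertBy pvLtK (pvKeyB f) ks).flatMap g' := by
  intro ks
  induction ks with
  | nil =>
    intro g g' _ _ _ _ hgf
    rw [List.flatMap_nil, pvInsertBy_nil, pvInsertBy_nil, List.flatMap_cons, List.flatMap_nil,
      hgf, List.append_nil]
  | cons k ks ih =>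
    intro g g' hp hkey hnm hg hgf
    rcases List.pairwise_cons.mp hp with ⟨hk, hks⟩
    by_cases hlt : pvLtK (pvKeyB f) k = true
    · have hall : ∀ y ∈ (k :: ks).flatMap g, pvBefore2 f y = true := by
        intro y hy
        rcases List.mem_flatMap.mp hy with ⟨k', hk', hyk⟩
        have hky : pvKeyB y = k' := hkey k' hk' y hyk
        have : pvLtK (pvKeyB f) k' = true := by
          rcases List.mem_cons.mp hk' with rfl | hk'
          · exact hlt
          · exact pvLtK_trans hlt (hk k' hk')
        rw [pvBefore2, hky]
        exact this
      have hall2 : ∀ y ∈ (k :: ks), pvLtK (pvKeyB f) y = true := by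
        intro y hy
        rcases List.mem_cons.mp hy with rfl | hy
        · exact hlt
        · exact pvLtK_trans hlt (hk y hy)
      rw [pvInsertBy_all_before _ _ _ hall, pvInsertBy_all_before _ _ _ hall2,
        List.flatMap_cons (f := g'), hgf, List.singleton_append]
      congr 1
      exact (List.flatMap_congr (fun k' hk' => (hg k' hk').symm))
    · have hne : pvKeyB f ≠ k := fun h => hnm (h ▸ List.mem_cons_self ..)
      have hgk : ∀ y ∈ g k, pvBefore2 f y = false := by
        intro y hy
        have hky : pvKeyB y = k := hkey k (List.mem_cons_self ..) y hy
        rw [pvBefore2, hky]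
        exact Bool.not_eq_true _ ▸ (by simpa using hlt)
      rw [List.flatMap_cons, pvInsertBy_skip _ _ _ _ hgk,
        pvInsertBy_cons, if_neg hlt, List.flatMap_cons, hg k (List.mem_cons_self ..)]
      rw [ih g g' hks (fun k' hk' => hkey k' (List.mem_cons_of_mem _ hk'))
        (fun h => hnm (List.mem_cons_of_mem _ h))
        (fun k' hk' => hg k' (List.mem_cons_of_mem _ hk')) hgf]

-- existing key: f is appended at the end of its own bucket
lemma pvInsert_group_mem (f : String) :
    ∀ (ks : List (List Char × Int)) (g : (List Char × Int) → List String),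
    ks.Pairwise (fun a b => pvLtK a b = true) →
    (∀ k ∈ ks, ∀ y ∈ g k, pvKeyB y = k) →
    pvKeyB f ∈ ks →
    PySem.List.insertBy pvBefore2 f (ks.flatMap g)
      = ks.flatMap (fun k => g k ++ if pvKeyB f == k then [f] else []) := by
  intro ks
  induction ks with
  | nil => intro g _ _ hm; cases hm
  | cons k ks ih =>
    intro g hp hkey hm
    rcases List.pairwise_cons.mp hp with ⟨hk, hks⟩
    by_cases heq : pvKeyB f = k
    · have hgk : ∀ y ∈ g k, pvBefore2 f y = false := by
        intro y hy
        have hky : pvKeyB y = k := hkey k (List.mem_cons_self ..) y hy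
        rw [pvBefore2, hky, heq]
        exact pvLtK_irrefl k
      have hrest : ∀ y ∈ ks.flatMap g, pvBefore2 f y = true := by
        intro y hy
        rcases List.mem_flatMap.mp hy with ⟨k', hk', hyk⟩
        have hky : pvKeyB y = k' := hkey k' (List.mem_cons_of_mem _ hk') y hyk
        rw [pvBefore2, hky, heq]
        exact hk k' hk'
      have hcongr : ks.flatMap (fun k' => g k' ++ if pvKeyB f == k' then [f] else [])
          = ks.flatMap g := by
        refine List.flatMap_congr ?_
        intro x hx
        have hne : ¬ (pvKeyB f == x) = true := by
          rw [heq]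
          simpa using pvLtK_ne (hk x hx)
        rw [if_neg hne, List.append_nil]
      rw [List.flatMap_cons, pvInsertBy_skip _ _ _ _ hgk, pvInsertBy_all_before _ _ _ hrest,
        List.flatMap_cons, if_pos (by simpa using heq), hcongr]
      simp
    · have hm' : pvKeyB f ∈ ks := by
        rcases List.mem_cons.mp hm with h | h
        · exact absurd h heq
        · exact h
      have hltf : pvLtK (pvKeyB f) k = false := pvLtK_asymm (hk _ hm')
      have hgk : ∀ y ∈ g k, pvBefore2 f y = false := by
        intro y hy
        have hky : pvKeyB y = k := hkey k (List.mem_cons_self ..) y hy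
        rw [pvBefore2, hky]
        exact hltf
      rw [List.flatMap_cons, pvInsertBy_skip _ _ _ _ hgk, List.flatMap_cons,
        if_neg (by simpa using heq), List.append_nil,
        ih g hks (fun k' hk' => hkey k' (List.mem_cons_of_mem _ hk')) hm']

-- ===== insertion sort of the files = sorted-distinct-keys bucket emission =====

lemma pvGroup_key (fs : List String) (k : List Char × Int) :
    ∀ y ∈ fs.filter (fun f => pvKeyB f == k), pvKeyB y = k := by
  intro y hy
  have := List.of_mem_filter hy
  simpa using this

lemma pvOfList_append_singleton (l : List (List Char × Int)) (x : List Char × Int) :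
    PySem.Set.ofList (l ++ [x]) = PySem.Set.add (PySem.Set.ofList l) x := by
  rw [PySem.Set.ofList, PySem.Set.ofList, List.foldl_append, List.foldl_cons, List.foldl_nil]

lemma pvMain (fs : List String) :
    fs.foldl (fun a x => PySem.List.insertBy pvBefore2 x a) []
      = (pvSortK (PySem.Set.ofList (fs.map pvKeyB))).flatMap
          (fun k => fs.filter (fun f => pvKeyB f == k)) := by
  induction fs using List.reverseRecOn with
  | nil => rfl
  | append_singleton fs f ih =>
    rw [List.foldl_append, List.foldl_cons, List.foldl_nil, ih]
    have hfilter : ∀ k, (fs ++ [f]).filter (fun x => pvKeyB x == k)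
        = fs.filter (fun x => pvKeyB x == k) ++ if pvKeyB f == k then [f] else [] := by
      intro k
      rw [List.filter_append]
      congr 1
      simp [List.filter_cons]
    have hkeys : (fs ++ [f]).map pvKeyB = fs.map pvKeyB ++ [pvKeyB f] := by simp
    have hpair := pvPairwise_sortK (PySem.Set.ofList (fs.map pvKeyB)) (PySem.Set.nodup_ofList _)
    by_cases hmem : pvKeyB f ∈ fs.map pvKeyB
    · have hc : (PySem.Set.ofList (fs.map pvKeyB)).contains (pvKeyB f) = true :=
        List.contains_iff_mem.mpr ((PySem.Set.mem_ofList _ _).mpr hmem)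
      have hofl : PySem.Set.ofList ((fs ++ [f]).map pvKeyB) = PySem.Set.ofList (fs.map pvKeyB) := by
        rw [hkeys, pvOfList_append_singleton, PySem.Set.add, hc, if_pos rfl]
      rw [hofl]
      have hm : pvKeyB f ∈ pvSortK (PySem.Set.ofList (fs.map pvKeyB)) := by
        rw [pvMem_sortK, PySem.Set.mem_ofList]; exact hmem
      rw [pvInsert_group_mem f _ _ hpair (fun k _ => pvGroup_key fs k) hm]
      exact List.flatMap_congr (fun k _ => (hfilter k).symm)
    · have hc : (PySem.Set.ofList (fs.map pvKeyB)).contains (pvKeyB f) = false := by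
        rw [Bool.eq_false_iff]
        intro hc
        exact hmem ((PySem.Set.mem_ofList _ _).mp (List.contains_iff_mem.mp hc))
      have hofl : PySem.Set.ofList ((fs ++ [f]).map pvKeyB)
          = PySem.Set.ofList (fs.map pvKeyB) ++ [pvKeyB f] := by
        rw [hkeys, pvOfList_append_singleton, PySem.Set.add, hc, if_neg Bool.false_ne_true]
      rw [hofl]
      have hsK : pvSortK (PySem.Set.ofList (fs.map pvKeyB) ++ [pvKeyB f])
          = PySem.List.insertBy pvLtK (pvKeyB f) (pvSortK (PySem.Set.ofList (fs.map pvKeyB))) := by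
        rw [pvSortK, List.foldl_append, List.foldl_cons, List.foldl_nil]; rfl
      rw [hsK]
      have hnm : pvKeyB f ∉ pvSortK (PySem.Set.ofList (fs.map pvKeyB)) := by
        rw [pvMem_sortK, PySem.Set.mem_ofList]; exact hmem
      have hgne : ∀ k ∈ pvSortK (PySem.Set.ofList (fs.map pvKeyB)),
          (fun k => (fs ++ [f]).filter (fun x => pvKeyB x == k)) k
            = (fun k => fs.filter (fun x => pvKeyB x == k)) k := by
        intro k hkk
        have hne : ¬ (pvKeyB f == k) = true := by
          simp only [beq_iff_eq]
          intro h
          exact hnm (h ▸ hkk)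
        show List.filter (fun x => pvKeyB x == k) (fs ++ [f]) = List.filter (fun x => pvKeyB x == k) fs
        rw [hfilter k, if_neg hne, List.append_nil]
      have hgf : (fun k => (fs ++ [f]).filter (fun x => pvKeyB x == k)) (pvKeyB f) = [f] := by
        have hnil : fs.filter (fun x => pvKeyB x == pvKeyB f) = [] := by
          rw [List.filter_eq_nil_iff]
          intro x hx
          simp only [beq_iff_eq]
          intro h
          exact hmem (h ▸ List.mem_map_of_mem hx)
        show List.filter (fun x => pvKeyB x == pvKeyB f) (fs ++ [f]) = [f]
        rw [hfilter (pvKeyB f), hnil, if_pos (by simp), List.nil_append]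
      exact pvInsert_group_new f _ _ _ hpair (fun k _ => pvGroup_key fs k) hnm hgne hgf

-- ===== VERDICT (by name: the statement is the Claim_ definition above) =====
theorem solution_spec : Claim_equal_solution := by
  intro files _ _
  show solution files = solution_alt files
  rw [solution]
  simp only []
  rw [pvArr_eq files [] 0, List.nil_append]
  have h1 := pvSort_comm files 0 [] (by simp)
  rw [List.map_nil] at h1
  rw [h1, pvMain]
  rfl
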